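-- pv_equiv track=rewrite | github.com/SamuelMaltais/CompetitiveProg | Kattis/averagesubstringGPT.py | F
-- ===== SOURCE A (Python) =====
-- def F(s, d):
--     """Count the number of substrings of s in which every digit is <= d."""
--     total = 0
--     current_length = 0
--     for ch in s:
--         if int(ch) <= d:
--             current_length += 1
--         else:
--             total += current_length * (current_length + 1) // 2
--             current_length = 0
--     total += current_length * (current_length + 1) // 2
--     return total
-- ===== SOURCE B (Python) =====
-- def F(s, d):
--     """Count the number of substrings of s in which every digit is <= d."""
--     n = len(s)
--     total = n * (n + 1) // 2
--     prev = -1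
--     for i, ch in enumerate(s):
--         if int(ch) > d:
--             total -= (i - prev) * (n - i)
--             prev = i
--     return total
-- ===== Notes on version B (the rewrite author's own statement) =====
-- stated objective: alternative
-- what changed: B counts by complement: it starts from the total number of substrings n(n+1)//2 and, for each digit > d at position i, subtracts (i - prev_bad)*(n - i), the substrings whose last bad digit is i, instead of A's per-run triangular accumulation.
import Mathlib
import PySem

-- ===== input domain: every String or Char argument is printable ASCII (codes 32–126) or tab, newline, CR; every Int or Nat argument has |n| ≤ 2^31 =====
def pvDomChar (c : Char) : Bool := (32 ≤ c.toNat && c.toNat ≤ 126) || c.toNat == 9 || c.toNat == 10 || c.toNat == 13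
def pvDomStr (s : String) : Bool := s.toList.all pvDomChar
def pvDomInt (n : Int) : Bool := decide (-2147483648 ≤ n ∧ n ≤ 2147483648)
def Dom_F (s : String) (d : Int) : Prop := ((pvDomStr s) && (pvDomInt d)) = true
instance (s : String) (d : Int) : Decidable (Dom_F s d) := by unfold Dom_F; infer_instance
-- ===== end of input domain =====

-- B counts substrings by complement (all substrings minus those whose last bad digit is at i), replacing A's per-run triangular accumulation (objective: alternative).


-- ===== PORT A =====
-- int(ch) on a single character is ported as ch.toNat - 48; under Pre_F every ch is an
-- ASCII digit, where this is exact (on non-digit chars Python's int(ch) raises ValueError).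
def F (s : String) (d : Int) : Int :=
  let st := s.toList.foldl
    (fun (p : Int × Int) ch =>
      if ((ch.toNat : Int) - 48) ≤ d then (p.1, p.2 + 1)
      else (p.1 + PySem.Int.floordiv (p.2 * (p.2 + 1)) 2, 0))
    (0, 0)
  st.1 + PySem.Int.floordiv (st.2 * (st.2 + 1)) 2

-- ===== PORT B =====
def F_alt (s : String) (d : Int) : Int :=
  let n : Int := s.toList.length
  ((PySem.List.enumerate s.toList 0).foldl
    (fun (p : Int × Int) (ic : Int × Char) =>
      if d < ((ic.2.toNat : Int) - 48) then (p.1 - (ic.1 - p.2) * (n - ic.1), ic.1)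
      else p)
    (PySem.Int.floordiv (n * (n + 1)) 2, -1)).1

-- ===== PRECONDITION & SPEC =====
-- Pre_F excludes strings containing a non-digit character: Python's int(ch) raises ValueError there.
def Pre_F (s : String) (d : Int) : Prop := (s.toList.all (fun c => c.isDigit)) = true
instance (s : String) (d : Int) : Decidable (Pre_F s d) := by unfold Pre_F; infer_instance
def pvWitness_F : String × Int := ("31415926", 4)
def Spec_F (s : String) (d : Int) (out : Int) : Prop := out = F_alt s d
instance (s : String) (d : Int) (out : Int) : Decidable (Spec_F s d out) := by unfold Spec_F; infer_instance

-- ===== CLAIM (what is proved, stated in full; the proofs are below) =====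
def Claim_equal_F : Prop := ∀ (s : String) (d : Int), Dom_F s d → Pre_F s d → Spec_F s d (F s d)

-- ===== LEMMAS AND PROOFS =====

theorem tri_succ (c : Int) :
    PySem.Int.floordiv ((c + 1) * (c + 1 + 1)) 2 =
      PySem.Int.floordiv (c * (c + 1)) 2 + (c + 1) := by
  obtain ⟨k, hk⟩ := Int.even_mul_succ_self c
  have h2 : (c + 1) * (c + 1 + 1) = c * (c + 1) + 2 * c + 2 := by ring
  rw [h2, hk, PySem.Int.floordiv_eq_ediv_of_pos (by norm_num),
      PySem.Int.floordiv_eq_ediv_of_pos (by norm_num)]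
  omega

-- Invariant: processing the suffix l (which starts at index i0 of the full string of
-- length n = i0 + l.length), B's fold started at total
-- t + tri c + tri (l.length) + l.length * c and prev = i0 - 1 - c ends at A's final value.
theorem fold_equiv (d n : Int) (l : List Char) : ∀ (i0 t c : Int), n = i0 + l.length →
    ((PySem.List.enumerate l i0).foldl
      (fun (p : Int × Int) (ic : Int × Char) =>
        if d < ((ic.2.toNat : Int) - 48) then (p.1 - (ic.1 - p.2) * (n - ic.1), ic.1)
        else p)
      (t + PySem.Int.floordiv (c * (c + 1)) 2
         + PySem.Int.floordiv ((l.length : Int) * ((l.length : Int) + 1)) 2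
         + (l.length : Int) * c,
       i0 - 1 - c)).1 =
    (l.foldl
      (fun (p : Int × Int) ch =>
        if ((ch.toNat : Int) - 48) ≤ d then (p.1, p.2 + 1)
        else (p.1 + PySem.Int.floordiv (p.2 * (p.2 + 1)) 2, 0))
      (t, c)).1 +
    PySem.Int.floordiv
      ((l.foldl
        (fun (p : Int × Int) ch =>
          if ((ch.toNat : Int) - 48) ≤ d then (p.1, p.2 + 1)
          else (p.1 + PySem.Int.floordiv (p.2 * (p.2 + 1)) 2, 0))
        (t, c)).2 *
       ((l.foldl
        (fun (p : Int × Int) ch =>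
          if ((ch.toNat : Int) - 48) ≤ d then (p.1, p.2 + 1)
          else (p.1 + PySem.Int.floordiv (p.2 * (p.2 + 1)) 2, 0))
        (t, c)).2 + 1)) 2 := by
  induction l with
  | nil =>
    intro i0 t c _
    simp [PySem.List.enumerate]
  | cons ch tl ih =>
    intro i0 t c hn
    rw [PySem.List.enumerate_cons]
    simp only [List.foldl_cons]
    by_cases h : ((ch.toNat : Int) - 48) ≤ d
    · rw [if_neg (by omega), if_pos h]
      have := ih (i0 + 1) t (c + 1) (by simp at hn ⊢; omega)
      rw [← this]
      congr 2
      have hl : ((ch :: tl).length : Int) = (tl.length : Int) + 1 := by simp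
      rw [Prod.mk.injEq, hl, tri_succ c, tri_succ (tl.length : Int)]
      exact ⟨by ring, by omega⟩
    · rw [if_pos (by omega), if_neg h]
      have := ih (i0 + 1) (t + PySem.Int.floordiv (c * (c + 1)) 2) 0 (by simp at hn ⊢; omega)
      rw [← this]
      congr 2
      have hl : ((ch :: tl).length : Int) = (tl.length : Int) + 1 := by simp
      have hn' : n - i0 = (tl.length : Int) + 1 := by simp at hn; omega
      have h0 : PySem.Int.floordiv (0 * (0 + 1)) 2 = 0 := by decide
      rw [Prod.mk.injEq, hl, tri_succ (tl.length : Int), hn', h0]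
      exact ⟨by ring, by omega⟩

-- ===== VERDICT (by name: the statement is the Claim_ definition above) =====
theorem F_spec : Claim_equal_F := by
  intro s d _ _
  unfold Spec_F F F_alt
  have := fold_equiv d (s.toList.length : Int) s.toList 0 0 0 (by simp)
  simp only [PySem.Int.floordiv] at this ⊢
  simpa using this.symm
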